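-- pv_equiv track=rewrite | github.com/asnakeassefa/A2SV_programming | leetcode/minimum-time-to-type-word-using-special-typewriter.py | minTimeToType
-- ===== SOURCE A (Python) =====
-- def minTimeToType(word: str) -> int:
--     letters = 'abcdefghijklmnopqrstuvwxyz'
--     ans = 0
--     curr = 0
--     for char in word:
--         ptr = 0
--         while letters[(curr - ptr) % 26] != char and letters[(curr + ptr) % 26] != char:
--             ptr += 1
--         if letters[(curr - ptr) % 26] == char:
--             curr = (curr - ptr) % 26
--         elif letters[(curr + ptr) % 26] == char:
--             curr = (curr + ptr) % 26
--         ans += ptr +1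
--     return ans
-- ===== SOURCE B (Python) =====
-- def minTimeToType(word: str) -> int:
--     ans = 0
--     curr = 0
--     for ch in word:
--         i = ord(ch) - 97
--         d = abs(i - curr)
--         ans += min(d, 26 - d) + 1
--         curr = i
--     return ans
-- ===== Notes on version B (the rewrite author's own statement) =====
-- stated objective: faster
-- what changed: Replaces A's outward position-by-position while-scan for each character with a closed-form circular-distance formula min(d, 26-d), removing the inner scan.
import Mathlib
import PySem

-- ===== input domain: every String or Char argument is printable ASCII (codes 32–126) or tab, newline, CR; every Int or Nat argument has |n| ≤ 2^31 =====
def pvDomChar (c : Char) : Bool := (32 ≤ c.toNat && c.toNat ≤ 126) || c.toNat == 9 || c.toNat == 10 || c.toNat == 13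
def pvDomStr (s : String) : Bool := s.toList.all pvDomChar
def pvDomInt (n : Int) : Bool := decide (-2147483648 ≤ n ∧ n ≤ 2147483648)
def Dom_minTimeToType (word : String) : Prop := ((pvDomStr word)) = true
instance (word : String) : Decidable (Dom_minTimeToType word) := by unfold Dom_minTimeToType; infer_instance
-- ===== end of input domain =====

-- B replaces A's outward position-by-position while-scan with a closed-form circular-distance formula (simpler).

-- ===== PORT A =====
def lettersA : List Char := "abcdefghijklmnopqrstuvwxyz".toList

-- letters[k % 26] — the index is always in range, so the default is never used
def letterAtA (k : Int) : Char :=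
  (PySem.List.pyGet? lettersA (PySem.Int.mod k 26)).getD ' '

-- the while loop; fuel 26 only makes the recursion total (whenever char occurs in
-- letters the loop stops within 14 iterations; otherwise Python's A diverges, excluded by Pre_)
def scanPtrA (curr : Int) (char : Char) : Nat → Int → Int
  | 0, ptr => ptr
  | n+1, ptr =>
    if letterAtA (curr - ptr) ≠ char ∧ letterAtA (curr + ptr) ≠ char then
      scanPtrA curr char n (ptr + 1)
    else ptr

def stepA (st : Int × Int) (char : Char) : Int × Int :=
  let ptr := scanPtrA st.2 char 26 0
  let curr' :=
    if letterAtA (st.2 - ptr) = char then PySem.Int.mod (st.2 - ptr) 26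
    else if letterAtA (st.2 + ptr) = char then PySem.Int.mod (st.2 + ptr) 26
    else st.2
  (st.1 + ptr + 1, curr')

def minTimeToType (word : String) : Int :=
  (word.toList.foldl stepA (0, 0)).1

-- ===== PORT B =====
def stepB (st : Int × Int) (ch : Char) : Int × Int :=
  let i : Int := (ch.toNat : Int) - 97
  let d : Int := |i - st.2|
  (st.1 + min d (26 - d) + 1, i)

def minTimeToType_alt (word : String) : Int :=
  (word.toList.foldl stepB (0, 0)).1

-- ===== PRECONDITION & SPEC =====
-- Pre_ excludes words containing any character other than a lowercase ASCII letter: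
-- there A's inner while-loop never finds the character, so Python's A DIVERGES (returns nothing).
def Pre_minTimeToType (word : String) : Prop :=
  word.toList.all (fun c => 'a' ≤ c && c ≤ 'z') = true
instance (word : String) : Decidable (Pre_minTimeToType word) := by
  unfold Pre_minTimeToType; infer_instance

def pvWitness_minTimeToType : String := "abcz"

def Spec_minTimeToType (word : String) (out : Int) : Prop := out = minTimeToType_alt word
instance (word : String) (out : Int) : Decidable (Spec_minTimeToType word out) := by unfold Spec_minTimeToType; infer_instance

-- ===== CLAIM (what is proved, stated in full; the proofs are below) =====
def Claim_equal_minTimeToType : Prop := ∀ (word : String), Dom_minTimeToType word → Pre_minTimeToType word → Spec_minTimeToType word (minTimeToType word)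

-- ===== LEMMAS AND PROOFS =====

theorem lettersA_length : lettersA.length = 26 := rfl

-- one step of A equals one step of B (at ans = 0) for every in-range curr and letter index
set_option maxHeartbeats 4000000 in
theorem step_key : ∀ cu ci : Fin 26,
    stepA (0, (cu : Int)) (lettersA.get (Fin.cast lettersA_length.symm ci)) =
    stepB (0, (cu : Int)) (lettersA.get (Fin.cast lettersA_length.symm ci)) := by decide

theorem lettersA_toNat : ∀ ci : Fin 26,
    (lettersA.get (Fin.cast lettersA_length.symm ci)).toNat = 97 + (ci : Nat) := by decide

theorem char_toNat_inj (a b : Char) (h : a.toNat = b.toNat) : a = b :=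
  Char.ext (UInt32.toNat_inj.mp h)

theorem char_bounds (c : Char) (h1 : 'a' ≤ c) (h2 : c ≤ 'z') :
    97 ≤ c.toNat ∧ c.toNat ≤ 122 :=
  ⟨UInt32.le_iff_toNat_le.mp (Char.le_def.mp h1),
   UInt32.le_iff_toNat_le.mp (Char.le_def.mp h2)⟩

theorem lettersA_get_eq (c : Char) (h1 : 'a' ≤ c) (h2 : c ≤ 'z') :
    lettersA.get (Fin.cast lettersA_length.symm
      ⟨c.toNat - 97, by have := char_bounds c h1 h2; omega⟩) = c := by
  apply char_toNat_inj
  rw [lettersA_toNat]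
  have := char_bounds c h1 h2
  change 97 + (c.toNat - 97) = c.toNat
  omega

-- a step of A equals a step of B at ANY accumulator (the step only adds to it)
theorem stepA_eq_stepB (cu : Fin 26) (c : Char) (h1 : 'a' ≤ c) (h2 : c ≤ 'z') (ans : Int) :
    stepA (ans, (cu : Int)) c = stepB (ans, (cu : Int)) c := by
  have hb := char_bounds c h1 h2
  have h0 := step_key cu ⟨c.toNat - 97, by omega⟩
  rw [lettersA_get_eq c h1 h2] at h0
  simp only [stepA, stepB, Prod.mk.injEq] at h0 ⊢
  obtain ⟨hfst, hsnd⟩ := h0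
  exact ⟨by omega, hsnd⟩

-- the fold lemma: for in-range curr and an all-lowercase tail, the two folds agree
theorem fold_eq (l : List Char) (hl : l.all (fun c => 'a' ≤ c && c ≤ 'z') = true)
    (cu : Fin 26) (ans : Int) :
    (l.foldl stepA (ans, (cu : Int))).1 = (l.foldl stepB (ans, (cu : Int))).1 := by
  induction l generalizing cu ans with
  | nil => rfl
  | cons c t ih =>
    simp only [List.all_cons, Bool.and_eq_true, decide_eq_true_eq] at hl
    obtain ⟨⟨h1, h2⟩, ht⟩ := hl
    have hb := char_bounds c h1 h2
    have hstep := stepA_eq_stepB cu c h1 h2 ans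
    set ci : Fin 26 := ⟨c.toNat - 97, by omega⟩ with hci
    have hB : stepB (ans, (cu : Int)) c
        = (ans + min |((c.toNat : Int) - 97) - cu| (26 - |((c.toNat : Int) - 97) - cu|) + 1,
           ((ci : Nat) : Int)) := by
      simp only [stepB, hci, Prod.mk.injEq, Fin.val_mk]
      exact ⟨trivial, by omega⟩
    simp only [List.foldl_cons, hstep, hB]
    exact ih ht ci _

-- ===== VERDICT (by name: the statement is the Claim_ definition above) =====
theorem minTimeToType_spec : Claim_equal_minTimeToType := by
  intro word _ hpre
  unfold Spec_minTimeToType minTimeToType minTimeToType_alt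
  have h := fold_eq word.toList hpre (⟨0, by omega⟩ : Fin 26) 0
  simpa using h
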